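-- pv_equiv track=rewrite | github.com/vxcarson/thesis_code | Automation/utils/plot.py | filter_histogram_bins
-- ===== SOURCE A (Python) =====
-- def should_filter_bin(histogram, i):
--     if histogram[i] != 0:
--         return True
--
--     if i in [0, len(histogram)-1]:
--         return True
--
--     if histogram[i-1] or histogram[i+1]:
--         return True
--
--     return False
--
-- def filter_histogram_bins(histogram, bin_width):
--     h = histogram + [histogram[-1]]
--
--     bins = {
--         bin_no * bin_width: bin_value
--         for bin_no, bin_value in enumerate(h)
--         if should_filter_bin(h, bin_no)
--     }
--     return bins
-- ===== SOURCE B (Python) =====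
-- def filter_histogram_bins(histogram, bin_width):
--     h = histogram + [histogram[-1]]
--     n = len(h)
--     keep = {0, n - 1}
--     for j, v in enumerate(h):
--         if v != 0:
--             keep.add(max(j - 1, 0))
--             keep.add(j)
--             keep.add(min(j + 1, n - 1))
--     result = {}
--     for idx in sorted(keep):
--         result[idx * bin_width] = h[idx]
--     return result
-- ===== Notes on version B (the rewrite author's own statement) =====
-- stated objective: alternative
-- what changed: Replaces the per-bin neighbor-testing predicate (which re-indexes h[i-1]/h[i+1] for every bin) by a single forward dilation of the nonzero-index set into a 'keep' set seeded with both boundary indices, then emits the kept indices in sorted order.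
-- outside the precondition, e.g. on filter_histogram_bins([], 5): A raises IndexError, B raises IndexError
import Mathlib
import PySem

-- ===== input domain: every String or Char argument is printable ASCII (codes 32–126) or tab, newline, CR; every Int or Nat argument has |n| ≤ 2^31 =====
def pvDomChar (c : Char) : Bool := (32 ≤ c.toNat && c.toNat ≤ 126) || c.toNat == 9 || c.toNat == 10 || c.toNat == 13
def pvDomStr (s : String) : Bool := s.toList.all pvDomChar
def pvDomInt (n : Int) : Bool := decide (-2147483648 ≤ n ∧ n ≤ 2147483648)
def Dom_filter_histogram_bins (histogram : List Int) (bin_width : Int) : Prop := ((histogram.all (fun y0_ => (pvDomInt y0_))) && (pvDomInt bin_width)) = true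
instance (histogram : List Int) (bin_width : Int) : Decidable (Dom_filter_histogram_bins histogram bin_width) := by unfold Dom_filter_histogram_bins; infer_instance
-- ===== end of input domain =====

-- B replaces A's per-bin neighbor-testing predicate by one forward dilation of the nonzero
-- index set into a `keep` set, then emits the kept indices in sorted order (objective: alternative).

-- ===== PORT A =====
-- helper should_filter_bin; the indices it reads are always in range when called from
-- filter_histogram_bins, so pyGetD (with default 0) is exact there
def should_filter_bin (histogram : List Int) (i : Int) : Bool :=
  if PySem.List.pyGetD histogram i 0 ≠ 0 then true
  else if i ∈ ([0, PySem.List.len histogram - 1] : List Int) then true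
  else if PySem.List.pyGetD histogram (i - 1) 0 ≠ 0 ∨ PySem.List.pyGetD histogram (i + 1) 0 ≠ 0 then true
  else false

def filter_histogram_bins (histogram : List Int) (bin_width : Int) : List (Int × Int) :=
  match PySem.List.pyGet? histogram (-1) with
  | none => []   -- histogram[-1] raises IndexError on []; excluded by Pre_
  | some last =>
    let h := histogram ++ [last]
    ((PySem.List.enumerate h).foldl
      (fun d p => if should_filter_bin h p.1 then d.insert (p.1 * bin_width) p.2 else d)
      (PySem.Dict.empty)).items

-- ===== PORT B =====
def filter_histogram_bins_alt (histogram : List Int) (bin_width : Int) : List (Int × Int) :=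
  match PySem.List.pyGet? histogram (-1) with
  | none => []   -- histogram[-1] raises IndexError on []; excluded by Pre_
  | some last =>
    let h := histogram ++ [last]
    let n : Int := PySem.List.len h
    let keep : PySem.Set Int :=
      (PySem.List.enumerate h).foldl
        (fun s p => if p.2 ≠ 0 then
            ((s.add (max (p.1 - 1) 0)).add p.1).add (min (p.1 + 1) (n - 1))
          else s)
        ((PySem.Set.empty.add 0).add (n - 1))
    ((PySem.List.sorted keep (fun x => x)).foldl
      (fun d idx => d.insert (idx * bin_width) (PySem.List.pyGetD h idx 0))
      (PySem.Dict.empty)).items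

-- ===== PRECONDITION & SPEC =====
-- Pre_ excludes only the empty histogram, on which A raises IndexError (histogram[-1])
def Pre_filter_histogram_bins (histogram : List Int) (bin_width : Int) : Prop := histogram ≠ []
instance (histogram : List Int) (bin_width : Int) : Decidable (Pre_filter_histogram_bins histogram bin_width) := by unfold Pre_filter_histogram_bins; infer_instance

def pvWitness_filter_histogram_bins : List Int × Int := ([0, 3, 0], 2)

def Spec_filter_histogram_bins (histogram : List Int) (bin_width : Int) (out : List (Int × Int)) : Prop := out = filter_histogram_bins_alt histogram bin_width
instance (histogram : List Int) (bin_width : Int) (out : List (Int × Int)) : Decidable (Spec_filter_histogram_bins histogram bin_width out) := by unfold Spec_filter_histogram_bins; infer_instance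

-- ===== CLAIM (what is proved, stated in full; the proofs are below) =====
def Claim_equal_filter_histogram_bins : Prop := ∀ (histogram : List Int) (bin_width : Int), Dom_filter_histogram_bins histogram bin_width → Pre_filter_histogram_bins histogram bin_width → Spec_filter_histogram_bins histogram bin_width (filter_histogram_bins histogram bin_width)

-- ===== LEMMAS AND PROOFS =====

-- membership in B's keep-building fold
theorem mem_keep_fold (n : Int) (l : List (Int × Int)) (s : PySem.Set Int) (x : Int) :
    x ∈ l.foldl
        (fun s p => if p.2 ≠ 0 then
            ((s.add (max (p.1 - 1) 0)).add p.1).add (min (p.1 + 1) (n - 1))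
          else s) s
      ↔ x ∈ s ∨ ∃ p ∈ l, p.2 ≠ 0 ∧
          (x = max (p.1 - 1) 0 ∨ x = p.1 ∨ x = min (p.1 + 1) (n - 1)) := by
  induction l generalizing s with
  | nil => simp
  | cons q l ih =>
    simp only [List.foldl_cons]
    by_cases hq : q.2 = 0
    · rw [if_neg (by simp [hq]), ih]
      simp [hq]
    · rw [if_pos (by simpa using hq), ih]
      simp only [PySem.Set.mem_add, List.exists_mem_cons_iff, or_assoc]
      constructor
      · rintro (hs | hx | hx | hx | hE)
        · exact Or.inl hs
        · exact Or.inr (Or.inl ⟨hq, Or.inl hx⟩)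
        · exact Or.inr (Or.inl ⟨hq, Or.inr (Or.inl hx)⟩)
        · exact Or.inr (Or.inl ⟨hq, Or.inr (Or.inr hx)⟩)
        · exact Or.inr (Or.inr hE)
      · rintro (hs | ⟨_, hx | hx | hx⟩ | hE)
        · exact Or.inl hs
        · exact Or.inr (Or.inl hx)
        · exact Or.inr (Or.inr (Or.inl hx))
        · exact Or.inr (Or.inr (Or.inr (Or.inl hx)))
        · exact Or.inr (Or.inr (Or.inr (Or.inr hE)))

-- B's keep-building fold keeps the set duplicate-free
theorem nodup_keep_fold (n : Int) (l : List (Int × Int)) (s : PySem.Set Int) (hs : s.Nodup) :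
    (l.foldl
        (fun s p => if p.2 ≠ 0 then
            ((s.add (max (p.1 - 1) 0)).add p.1).add (min (p.1 + 1) (n - 1))
          else s) s).Nodup := by
  induction l generalizing s with
  | nil => exact hs
  | cons q l ih =>
    simp only [List.foldl_cons]
    split
    · exact ih _ (PySem.Set.nodup_add _ _ (PySem.Set.nodup_add _ _ (PySem.Set.nodup_add _ _ hs)))
    · exact ih _ hs

-- A's predicate as a plain disjunction
theorem should_filter_bin_iff (h : List Int) (x : Int) :
    should_filter_bin h x = true ↔
      PySem.List.pyGetD h x 0 ≠ 0 ∨ (x = 0 ∨ x = PySem.List.len h - 1) ∨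
      PySem.List.pyGetD h (x - 1) 0 ≠ 0 ∨ PySem.List.pyGetD h (x + 1) 0 ≠ 0 := by
  simp only [should_filter_bin, List.mem_cons, List.not_mem_nil, or_false]
  split_ifs <;> simp_all

-- the heart: membership in the dilated set coincides with range ∧ should_filter_bin
theorem keep_iff (h : List Int) (hlen : 1 ≤ h.length) (x : Int) :
    (x = 0 ∨ x = (h.length : Int) - 1 ∨ ∃ k, ∃ hk : k < h.length, h[k] ≠ 0 ∧
        (x = max ((k : Int) - 1) 0 ∨ x = (k : Int) ∨ x = min ((k : Int) + 1) ((h.length : Int) - 1)))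
    ↔ (0 ≤ x ∧ x < (h.length : Int) ∧ should_filter_bin h x = true) := by
  have hlenI : (1 : Int) ≤ (h.length : Int) := by exact_mod_cast hlen
  constructor
  · rintro (rfl | rfl | ⟨k, hk, hknz, hx⟩)
    · refine ⟨le_refl 0, by omega, ?_⟩
      rw [should_filter_bin_iff]
      exact Or.inr (Or.inl (Or.inl rfl))
    · refine ⟨by omega, by omega, ?_⟩
      rw [should_filter_bin_iff]
      exact Or.inr (Or.inl (Or.inr rfl))
    · have hkI : (k : Int) < (h.length : Int) := by exact_mod_cast hk
      rcases hx with rfl | rfl | rfl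
      · by_cases hk0 : k = 0
        · subst hk0
          refine ⟨by omega, by omega, ?_⟩
          rw [should_filter_bin_iff]
          exact Or.inr (Or.inl (Or.inl (by omega)))
        · have hk1 : (1 : Int) ≤ (k : Int) := by omega
          refine ⟨by omega, by omega, ?_⟩
          rw [should_filter_bin_iff]
          refine Or.inr (Or.inr (Or.inr ?_))
          have hxk : max ((k : Int) - 1) 0 + 1 = (k : Int) := by omega
          rw [hxk, PySem.List.pyGetD_natCast, List.getD_eq_getElem h 0 hk]
          exact hknz
      · refine ⟨by omega, by omega, ?_⟩
        rw [should_filter_bin_iff]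
        refine Or.inl ?_
        rw [PySem.List.pyGetD_natCast, List.getD_eq_getElem h 0 hk]
        exact hknz
      · by_cases hke : (k : Int) + 1 ≤ (h.length : Int) - 1
        · have hmin : min ((k : Int) + 1) ((h.length : Int) - 1) = (k : Int) + 1 := by omega
          refine ⟨by omega, by omega, ?_⟩
          rw [should_filter_bin_iff]
          refine Or.inr (Or.inr (Or.inl ?_))
          have hxk : min ((k : Int) + 1) ((h.length : Int) - 1) - 1 = (k : Int) := by omega
          rw [hxk, PySem.List.pyGetD_natCast, List.getD_eq_getElem h 0 hk]
          exact hknz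
        · have hmin : min ((k : Int) + 1) ((h.length : Int) - 1) = (h.length : Int) - 1 := by omega
          refine ⟨by omega, by omega, ?_⟩
          rw [should_filter_bin_iff]
          exact Or.inr (Or.inl (Or.inr (by rw [hmin]; rfl)))
  · rintro ⟨hx0, hxn, hsh⟩
    rw [should_filter_bin_iff] at hsh
    rcases hsh with hc | hb | hcm | hcp
    · refine Or.inr (Or.inr ⟨x.toNat, by omega, ?_, Or.inr (Or.inl (by omega))⟩)
      rwa [PySem.List.pyGetD_eq_getElem h 0 hx0 hxn] at hc
    · rcases hb with hb | hb
      · exact Or.inl hb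
      · exact Or.inr (Or.inl hb)
    · by_cases hb0 : x = 0
      · exact Or.inl hb0
      by_cases hbn : x = (h.length : Int) - 1
      · exact Or.inr (Or.inl hbn)
      have h1 : (0 : Int) ≤ x - 1 := by omega
      have h2 : x - 1 < (h.length : Int) := by omega
      refine Or.inr (Or.inr ⟨(x - 1).toNat, by omega, ?_, Or.inr (Or.inr (by omega))⟩)
      rwa [PySem.List.pyGetD_eq_getElem h 0 h1 h2] at hcm
    · by_cases hb0 : x = 0
      · exact Or.inl hb0
      by_cases hbn : x = (h.length : Int) - 1
      · exact Or.inr (Or.inl hbn)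
      have h1 : (0 : Int) ≤ x + 1 := by omega
      have h2 : x + 1 < (h.length : Int) := by omega
      refine Or.inr (Or.inr ⟨(x + 1).toNat, by omega, ?_, Or.inl (by omega)⟩)
      rwa [PySem.List.pyGetD_eq_getElem h 0 h1 h2] at hcp

-- ===== VERDICT (by name: the statement is the Claim_ definition above) =====
theorem filter_histogram_bins_spec : Claim_equal_filter_histogram_bins := by
  intro histogram bin_width _ _
  unfold Spec_filter_histogram_bins filter_histogram_bins filter_histogram_bins_alt
  cases hL : PySem.List.pyGet? histogram (-1) with
  | none => rfl
  | some last =>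
    dsimp only
    have hlen : 1 ≤ (histogram ++ [last]).length := by simp
    generalize (histogram ++ [last] : List Int) = h at hlen
    set n : Int := PySem.List.len h with hn
    have hnl : n = (h.length : Int) := rfl
    set FR := (PySem.List.pyRange 0 n).filter (fun j => should_filter_bin h j) with hFR
    have hkeepmem : ∀ x : Int,
        x ∈ ((PySem.List.enumerate h).foldl
          (fun s p => if p.2 ≠ 0 then
              ((s.add (max (p.1 - 1) 0)).add p.1).add (min (p.1 + 1) (n - 1))
            else s)
          ((PySem.Set.empty.add 0).add (n - 1)))
        ↔ (x = 0 ∨ x = (h.length : Int) - 1 ∨ ∃ k, ∃ hk : k < h.length, h[k] ≠ 0 ∧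
            (x = max ((k : Int) - 1) 0 ∨ x = (k : Int) ∨ x = min ((k : Int) + 1) ((h.length : Int) - 1))) := by
      intro x
      rw [mem_keep_fold]
      simp only [PySem.Set.mem_add]
      constructor
      · rintro (((he | rfl) | rfl) | ⟨p, hp, hz, hx⟩)
        · simp [PySem.Set.empty] at he
        · exact Or.inl rfl
        · exact Or.inr (Or.inl rfl)
        · rw [PySem.List.mem_enumerate_iff] at hp
          obtain ⟨k, hk, rfl⟩ := hp
          exact Or.inr (Or.inr ⟨k, hk, by simpa using hz, by simpa using hx⟩)
      · rintro (rfl | rfl | ⟨k, hk, hz, hx⟩)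
        · exact Or.inl (Or.inl (Or.inr rfl))
        · exact Or.inl (Or.inr rfl)
        · refine Or.inr ⟨((0 : Int) + (k : Int), h[k]), ?_, by simpa using hz, by simpa using hx⟩
          exact (PySem.List.mem_enumerate_iff h 0 _).mpr ⟨k, hk, rfl⟩
    have hFRmem : ∀ x : Int, x ∈ FR ↔ (0 ≤ x ∧ x < (h.length : Int) ∧ should_filter_bin h x = true) := by
      intro x
      rw [hFR, List.mem_filter, PySem.List.mem_pyRange_one, and_assoc]
      exact Iff.rfl
    have hnodupFR : FR.Nodup := by
      rw [hFR]
      apply List.Nodup.filter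
      rw [hnl, PySem.List.pyRange_zero_natCast]
      exact List.Nodup.map (fun a b hab => by exact_mod_cast hab) List.nodup_range
    have hnodupK : (((PySem.Set.empty.add (0 : Int)).add (n - 1)) : PySem.Set Int).Nodup :=
      PySem.Set.nodup_add _ _ (PySem.Set.nodup_add _ _ List.nodup_nil)
    have hperm : FR.Perm ((PySem.List.enumerate h).foldl
          (fun (s : PySem.Set Int) p => if p.2 ≠ 0 then
              ((s.add (max (p.1 - 1) 0)).add p.1).add (min (p.1 + 1) (n - 1))
            else s)
          ((PySem.Set.empty.add 0).add (n - 1))) := by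
      rw [List.perm_ext_iff_of_nodup hnodupFR (nodup_keep_fold _ _ _ hnodupK)]
      intro a
      rw [hFRmem a, hkeepmem a, keep_iff h hlen a]
    have hpair : FR.Pairwise (fun a b => (fun x => x) a < (fun x => x) b) := by
      simp only
      rw [hFR]
      apply List.Pairwise.filter
      rw [hnl, PySem.List.pyRange_zero_natCast]
      exact List.Pairwise.map _ (fun a b hab => by exact_mod_cast hab) List.pairwise_lt_range
    rw [PySem.List.sorted_eq_of_perm_of_pairwise_lt _ FR _ hperm hpair]
    rw [PySem.List.enumerate_eq_map_pyRange h 0, List.foldl_map]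
    dsimp only
    rw [← List.foldl_filter]
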